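-- pv_equiv track=rewrite | github.com/rungjoo/simmc2.0 | sub2_2/dataset.py | utt2system
-- ===== SOURCE A (Python) =====
-- def utt2system(utt_obj, sys_obj_list):
--     utt_match_id = []
--     for utt_obj_id, utt_label in utt_obj.items():
--         if utt_label == 1:
--             utt_match_id.append(utt_obj_id)
--
--     """ system matching label (0,1) """
--     system2label = []
--     total_sys_match_id = []
--     for turn, sys_obj in enumerate(sys_obj_list):
--         """
--         sys_obj: {obj: 0 or 1}
--         """
--         sys_match_id = []
--         for sys_obj_id, sys_label in sys_obj.items():
--             if sys_label == 1:
--                 sys_match_id.append(sys_obj_id)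
--                 total_sys_match_id.append(sys_obj_id)
--
--         temp_match_id = []
--         match_num = 0
--         for sys_obj_id in sys_match_id:
--             if sys_obj_id in utt_match_id:
--                 match_num += 1
--                 temp_match_id.append(sys_obj_id)
--
--         if match_num == 0:
--             system2label.append(0)
--         else:
--             system2label.append(1)
--
--     """ object category label (0,1,2,3) """
--     match_num = 0
--     non_match_num = 0
--     for utt_obj_id in utt_match_id:
--         if utt_obj_id in total_sys_match_id:
--             match_num += 1
--         else:
--             non_match_num += 1
--
--     if match_num == 0:
--         if non_match_num == 0:
--             objcat2label = 0
--         else: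
--             objcat2label = 1
--     else:
--         if non_match_num == 0:
--             objcat2label = 1
--         else:
--             objcat2label = 1
--
--     return system2label, objcat2label
-- ===== SOURCE B (Python) =====
-- def utt2system(utt_obj, sys_obj_list):
--     # Transposed algorithm: pre-allocate the per-turn label array, then for each
--     # utterance object with label 1 scatter 1 into every turn whose dict maps it to 1.
--     system2label = [0] * len(sys_obj_list)
--     matched = False
--     for utt_obj_id, utt_label in utt_obj.items():
--         if utt_label == 1:
--             matched = True
--             for turn, sys_obj in enumerate(sys_obj_list):
--                 if sys_obj.get(utt_obj_id) == 1:
--                     system2label[turn] = 1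
--     return system2label, (1 if matched else 0)
-- ===== Notes on version B (the rewrite author's own statement) =====
-- stated objective: faster
-- what changed: B transposes A's loops: it pre-allocates the per-turn label array and, for each utterance object with label 1, scatters 1 into every turn whose dict maps that id to 1 (one O(1) dict lookup per turn), eliminating A's per-turn sys_match_id list building, the O(|utt_match|) list-membership scan per sys object, the total_sys_match_id accumulation and the whole final match/non-match classification loop (objcat2label is just 1 if any utterance object has label 1 else 0).
import Mathlib
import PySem

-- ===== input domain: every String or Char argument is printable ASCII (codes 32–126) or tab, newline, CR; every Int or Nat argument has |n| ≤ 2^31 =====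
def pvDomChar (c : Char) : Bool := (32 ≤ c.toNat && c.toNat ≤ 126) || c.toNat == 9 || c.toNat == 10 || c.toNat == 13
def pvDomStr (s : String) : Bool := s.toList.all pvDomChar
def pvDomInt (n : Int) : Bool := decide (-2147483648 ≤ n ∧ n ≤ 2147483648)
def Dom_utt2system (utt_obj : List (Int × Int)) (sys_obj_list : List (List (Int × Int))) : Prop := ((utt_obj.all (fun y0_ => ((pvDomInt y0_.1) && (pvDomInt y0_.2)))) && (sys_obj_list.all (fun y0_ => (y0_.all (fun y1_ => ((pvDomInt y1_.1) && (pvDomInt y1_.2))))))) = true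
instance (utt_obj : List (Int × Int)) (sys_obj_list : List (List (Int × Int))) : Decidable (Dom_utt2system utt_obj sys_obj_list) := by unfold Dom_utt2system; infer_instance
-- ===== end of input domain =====

-- B transposes A's loops (scatter over a pre-allocated label array, one dict.get per (matched utt id, turn))
-- and drops the total_sys_match_id accumulation and the final classification loop (objective: faster, measured).

-- ===== PORT A =====
-- literal transliteration of A; the dead temp_match_id list (never read) is omitted
def utt2system (utt_obj : List (Int × Int)) (sys_obj_list : List (List (Int × Int))) : List Int × Int :=
  let uttMatchId : List Int :=
    utt_obj.foldl (fun acc p => if p.2 == 1 then acc ++ [p.1] else acc) []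
  let st : List Int × List Int :=
    sys_obj_list.foldl (fun (st : List Int × List Int) sysObj =>
      let inner : List Int × List Int :=
        sysObj.foldl (fun (q : List Int × List Int) p =>
          if p.2 == 1 then (q.1 ++ [p.1], q.2 ++ [p.1]) else q) (([] : List Int), st.2)
      let matchNum : Int :=
        inner.1.foldl (fun (n : Int) id => if uttMatchId.contains id then n + 1 else n) 0
      (st.1 ++ [if matchNum == 0 then (0 : Int) else 1], inner.2))
      (([] : List Int), ([] : List Int))
  let cnt : Int × Int :=
    uttMatchId.foldl (fun (q : Int × Int) id =>
      if st.2.contains id then (q.1 + 1, q.2) else (q.1, q.2 + 1)) (0, 0)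
  let objcat : Int := if cnt.1 == 0 then (if cnt.2 == 0 then 0 else 1) else 1
  (st.1, objcat)

-- ===== PORT B =====
-- transliteration of Source B; the enumerate index is ≥ 0 and < len, so '.toNat' for list.set is exact here
def utt2system_alt (utt_obj : List (Int × Int)) (sys_obj_list : List (List (Int × Int))) : List Int × Int :=
  let st : List Int × Bool :=
    utt_obj.foldl (fun (st : List Int × Bool) p =>
      if p.2 == 1 then
        ((PySem.List.enumerate sys_obj_list).foldl (fun (labels : List Int) ts =>
            if (PySem.Dict.mk ts.2).get? p.1 == some 1 then labels.set ts.1.toNat 1 else labels) st.1,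
         true)
      else st)
      (List.replicate sys_obj_list.length 0, false)
  (st.1, if st.2 then 1 else 0)

-- ===== PRECONDITION & SPEC =====
-- Pre_ excludes only association lists whose inner sys_obj dicts carry a duplicate key: such lists do not
-- represent any Python dict (Python dicts cannot reach A with duplicate keys), so no input A returns on is excluded.
def Pre_utt2system (utt_obj : List (Int × Int)) (sys_obj_list : List (List (Int × Int))) : Prop :=
  ∀ so ∈ sys_obj_list, (so.map Prod.fst).Nodup
instance (utt_obj : List (Int × Int)) (sys_obj_list : List (List (Int × Int))) : Decidable (Pre_utt2system utt_obj sys_obj_list) := by unfold Pre_utt2system; infer_instance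
def pvWitness_utt2system : (List (Int × Int)) × (List (List (Int × Int))) := ([(1, 1), (2, 0)], [[(1, 1), (3, 0)], [(4, 1)]])

def Spec_utt2system (utt_obj : List (Int × Int)) (sys_obj_list : List (List (Int × Int))) (out : List Int × Int) : Prop := out = utt2system_alt utt_obj sys_obj_list
instance (utt_obj : List (Int × Int)) (sys_obj_list : List (List (Int × Int))) (out : List Int × Int) : Decidable (Spec_utt2system utt_obj sys_obj_list out) := by unfold Spec_utt2system; infer_instance

-- ===== CLAIM (what is proved, stated in full; the proofs are below) =====
def Claim_equal_utt2system : Prop := ∀ (utt_obj : List (Int × Int)) (sys_obj_list : List (List (Int × Int))), Dom_utt2system utt_obj sys_obj_list → Pre_utt2system utt_obj sys_obj_list → Spec_utt2system utt_obj sys_obj_list (utt2system utt_obj sys_obj_list)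

-- ===== LEMMAS AND PROOFS =====

-- A's inner per-turn loop: sys_match is the matched keys, total grows by the same keys.
theorem pv_inner_eq (so : List (Int × Int)) (acc tot : List Int) :
    so.foldl (fun (q : List Int × List Int) p =>
        if p.2 == 1 then (q.1 ++ [p.1], q.2 ++ [p.1]) else q) (acc, tot)
      = (acc ++ (so.filter (fun p => p.2 == 1)).map (·.1),
         tot ++ (so.filter (fun p => p.2 == 1)).map (·.1)) := by
  induction so generalizing acc tot with
  | nil => simp
  | cons p rest ih =>
    rw [List.foldl_cons]
    by_cases h : (p.2 == 1) = true
    · rw [if_pos h, ih]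
      simp [h, List.append_assoc]
    · rw [if_neg h, ih]
      simp [h]

-- A's per-turn label equals the any-test over the raw turn items.
theorem pv_label_eq (utt : List Int) (so : List (Int × Int)) :
    (if ((so.filter (fun p => p.2 == 1)).map (·.1)).foldl
          (fun (n : Int) id => if utt.contains id then n + 1 else n) 0 == 0
       then (0 : Int) else 1)
      = (if so.any (fun p => p.2 == 1 && utt.contains p.1) then (1 : Int) else 0) := by
  rw [PySem.List.foldl_if_add_one]
  have hiff : (so.any (fun p => p.2 == 1 && utt.contains p.1)) = true ↔
      0 < ((so.filter (fun p => p.2 == 1)).map (·.1)).countP (fun id => utt.contains id) := by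
    rw [List.any_eq_true, List.countP_pos_iff]
    constructor
    · rintro ⟨p, hp, hpt⟩
      rw [Bool.and_eq_true] at hpt
      exact ⟨p.1, List.mem_map_of_mem (List.mem_filter.mpr ⟨hp, hpt.1⟩), hpt.2⟩
    · rintro ⟨x, hx, hxc⟩
      rw [List.mem_map] at hx
      obtain ⟨p, hpf, rfl⟩ := hx
      rw [List.mem_filter] at hpf
      exact ⟨p, hpf.1, by rw [Bool.and_eq_true]; exact ⟨hpf.2, hxc⟩⟩
  cases h : so.any (fun p => p.2 == 1 && utt.contains p.1) with
  | false =>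
    have h0 : ((so.filter (fun p => p.2 == 1)).map (·.1)).countP (fun id => utt.contains id) = 0 := by
      by_contra hne
      exact (Bool.false_ne_true) (h ▸ hiff.mpr (Nat.pos_of_ne_zero hne))
    simp [h0]
  | true =>
    have hp := hiff.mp h
    have hne : ((0 : Int) + (((so.filter (fun p => p.2 == 1)).map (·.1)).countP (fun id => utt.contains id) : Int) == 0) = false := by
      rw [beq_eq_false_iff_ne]
      omega
    rw [hne]
    simp
 
-- A's outer loop: first component is the map of per-turn labels, independent of the total accumulator.
theorem pv_outer_eq (utt : List Int) (sol : List (List (Int × Int))) (acc tot : List Int) :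
    (sol.foldl (fun (st : List Int × List Int) sysObj =>
        let inner : List Int × List Int :=
          sysObj.foldl (fun (q : List Int × List Int) p =>
            if p.2 == 1 then (q.1 ++ [p.1], q.2 ++ [p.1]) else q) (([] : List Int), st.2)
        let matchNum : Int :=
          inner.1.foldl (fun (n : Int) id => if utt.contains id then n + 1 else n) 0
        (st.1 ++ [if matchNum == 0 then (0 : Int) else 1], inner.2)) (acc, tot))
      = (acc ++ sol.map (fun so =>
            if ((so.filter (fun p => p.2 == 1)).map (·.1)).foldl
                  (fun (n : Int) id => if utt.contains id then n + 1 else n) 0 == 0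
              then (0 : Int) else 1),
         tot ++ (sol.map (fun so => (so.filter (fun p => p.2 == 1)).map (·.1))).flatten) := by
  induction sol generalizing acc tot with
  | nil => simp
  | cons so rest ih =>
    simp only [List.foldl_cons, List.map_cons, List.flatten_cons]
    rw [pv_inner_eq]
    simp only [List.nil_append]
    rw [ih]
    simp [List.append_assoc]

-- the counting loop's two components sum to the length of the scanned list
theorem pv_cnt_sum (tot : List Int) (l : List Int) (a b : Int) :
    (l.foldl (fun (q : Int × Int) id =>
        if tot.contains id then (q.1 + 1, q.2) else (q.1, q.2 + 1)) (a, b)).1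
      + (l.foldl (fun (q : Int × Int) id =>
        if tot.contains id then (q.1 + 1, q.2) else (q.1, q.2 + 1)) (a, b)).2
      = a + b + l.length := by
  induction l generalizing a b with
  | nil => simp
  | cons x rest ih =>
    by_cases h : tot.contains x = true
    · rw [List.foldl_cons, if_pos h, ih, List.length_cons]
      push_cast
      ring
    · rw [List.foldl_cons, if_neg h, ih, List.length_cons]
      push_cast
      ring

-- A's final classification collapses to: 0 iff there are no matched utterance ids
theorem pv_objcat (tot l : List Int) :
    (if (l.foldl (fun (q : Int × Int) id =>
          if tot.contains id then (q.1 + 1, q.2) else (q.1, q.2 + 1)) ((0:Int), (0:Int))).1 == 0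
       then (if (l.foldl (fun (q : Int × Int) id =>
          if tot.contains id then (q.1 + 1, q.2) else (q.1, q.2 + 1)) ((0:Int), (0:Int))).2 == 0
          then (0 : Int) else 1)
       else 1)
      = if l.isEmpty then 0 else 1 := by
  cases l with
  | nil => simp
  | cons x rest =>
    have hsum := pv_cnt_sum tot (x :: rest) 0 0
    have hlen : (x :: rest).length = rest.length + 1 := rfl
    rw [if_neg (by simp : ¬ ((x :: rest).isEmpty = true))]
    split_ifs with h1 h2
    · exfalso
      rw [beq_iff_eq] at h1 h2
      omega
    · rfl
    · rfl

-- B's inner scatter: length preserved, entry t becomes 1 iff some enumerated pair hits t.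
theorem pv_scatter (c : List (Int × Int) → Bool) (ps : List (Int × List (Int × Int))) (L : List Int) :
    (ps.foldl (fun (labels : List Int) ts =>
        if c ts.2 then labels.set ts.1.toNat 1 else labels) L).length = L.length
    ∧ ∀ t : Nat, t < L.length →
      (ps.foldl (fun (labels : List Int) ts =>
        if c ts.2 then labels.set ts.1.toNat 1 else labels) L)[t]?
      = if ps.any (fun ts => c ts.2 && ts.1.toNat == t) then some (1 : Int) else L[t]? := by
  induction ps generalizing L with
  | nil => simp
  | cons q rest ih =>
    rw [List.foldl_cons]
    by_cases hc : c q.2 = true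
    · rw [if_pos hc]
      set L' := L.set q.1.toNat 1 with hL'
      have hlen : L'.length = L.length := by simp [hL']
      refine ⟨by rw [(ih L').1, hlen], ?_⟩
      intro t ht
      rw [(ih L').2 t (by rw [hlen]; exact ht)]
      by_cases hrest : rest.any (fun ts => c ts.2 && ts.1.toNat == t) = true
      · rw [if_pos hrest, if_pos (by simp [List.any_cons, hrest])]
      · rw [if_neg hrest]
        by_cases hq : q.1.toNat = t
        · rw [if_pos (by simp [List.any_cons, hc, hq]), hL', hq,
              List.getElem?_set_self ht]
        · rw [if_neg (by simp [List.any_cons, hrest, hq]), hL',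
              List.getElem?_set_ne hq]
    · rw [if_neg hc]
      refine ⟨(ih L).1, ?_⟩
      intro t ht
      rw [(ih L).2 t ht]
      have : ((q :: rest).any fun ts => c ts.2 && ts.1.toNat == t)
           = (rest.any fun ts => c ts.2 && ts.1.toNat == t) := by
        simp [List.any_cons, hc]
      rw [this]

-- the enumerate any-test at a valid index t reduces to the predicate at sol[t]
theorem pv_enum_any (c : List (Int × Int) → Bool) (sol : List (List (Int × Int)))
    (t : Nat) (ht : t < sol.length) :
    ((PySem.List.enumerate sol).any fun ts => c ts.2 && ts.1.toNat == t) = c (sol[t]'ht) := by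
  cases h : c (sol[t]'ht) with
  | true =>
    rw [List.any_eq_true]
    refine ⟨((t : Int), sol[t]'ht), ?_, by simp [h]⟩
    rw [PySem.List.mem_enumerate_iff]
    exact ⟨t, ht, by simp⟩
  | false =>
    rw [List.any_eq_false]
    rintro ts hts
    rw [PySem.List.mem_enumerate_iff] at hts
    obtain ⟨k, hk, rfl⟩ := hts
    simp only [Bool.and_eq_true, beq_iff_eq, not_and]
    intro hck hkt
    simp only [Int.zero_add, Int.toNat_natCast] at hkt
    subst hkt
    exact absurd hck (by simp [h])

-- B's outer fold: length, the matched flag, and every entry of the label array.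
theorem pv_b_outer (sol : List (List (Int × Int))) (l : List (Int × Int)) (L : List Int) (b : Bool)
    (hL : L.length = sol.length) :
    (l.foldl (fun (st : List Int × Bool) p =>
        if p.2 == 1 then
          ((PySem.List.enumerate sol).foldl (fun (labels : List Int) ts =>
              if (PySem.Dict.mk ts.2).get? p.1 == some 1 then labels.set ts.1.toNat 1 else labels) st.1,
           true)
        else st) (L, b)).1.length = sol.length
    ∧ (l.foldl (fun (st : List Int × Bool) p =>
        if p.2 == 1 then
          ((PySem.List.enumerate sol).foldl (fun (labels : List Int) ts =>
              if (PySem.Dict.mk ts.2).get? p.1 == some 1 then labels.set ts.1.toNat 1 else labels) st.1,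
           true)
        else st) (L, b)).2 = (b || l.any (fun p => p.2 == 1))
    ∧ ∀ (t : Nat) (ht : t < sol.length),
      (l.foldl (fun (st : List Int × Bool) p =>
        if p.2 == 1 then
          ((PySem.List.enumerate sol).foldl (fun (labels : List Int) ts =>
              if (PySem.Dict.mk ts.2).get? p.1 == some 1 then labels.set ts.1.toNat 1 else labels) st.1,
           true)
        else st) (L, b)).1[t]?
      = if l.any (fun p => p.2 == 1 && ((PySem.Dict.mk (sol[t]'ht)).get? p.1 == some 1)) then some 1 else L[t]? := by
  induction l generalizing L b with
  | nil => exact ⟨hL, by simp, fun t ht => by simp⟩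
  | cons p rest ih =>
    rw [List.foldl_cons]
    by_cases hp : (p.2 == 1) = true
    · rw [if_pos hp]
      have hsc := pv_scatter (fun so => (PySem.Dict.mk so).get? p.1 == some 1)
        (PySem.List.enumerate sol) L
      set L' := (PySem.List.enumerate sol).foldl (fun (labels : List Int) ts =>
          if (PySem.Dict.mk ts.2).get? p.1 == some 1 then labels.set ts.1.toNat 1 else labels) L with hL'
      have hlen' : L'.length = sol.length := by rw [hL', hsc.1, hL]
      obtain ⟨ih1, ih2, ih3⟩ := ih L' true hlen'
      refine ⟨ih1, by rw [ih2]; simp [List.any_cons, hp], ?_⟩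
      intro t ht
      rw [ih3 t ht]
      have hLt : L'[t]? = if (PySem.Dict.mk (sol[t]'ht)).get? p.1 == some 1 then some (1 : Int) else L[t]? := by
        rw [hL', hsc.2 t (by rw [hL]; exact ht),
            pv_enum_any (fun so => (PySem.Dict.mk so).get? p.1 == some 1) sol t ht]
      by_cases hr : rest.any (fun q => q.2 == 1 && ((PySem.Dict.mk (sol[t]'ht)).get? q.1 == some 1)) = true
      · rw [if_pos hr, if_pos (by simp [List.any_cons, hr])]
      · rw [if_neg hr, hLt]
        by_cases hg : ((PySem.Dict.mk (sol[t]'ht)).get? p.1 == some 1) = true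
        · rw [if_pos hg, if_pos (by simp [List.any_cons, hp, hg])]
        · rw [if_neg hg, if_neg (by simp [List.any_cons, hr, hp]; intro h2; exact absurd h2 (by simpa using hg))]
    · rw [if_neg hp]
      obtain ⟨ih1, ih2, ih3⟩ := ih L b hL
      refine ⟨ih1, by rw [ih2]; simp [List.any_cons, hp], ?_⟩
      intro t ht
      rw [ih3 t ht]
      have : ((p :: rest).any fun q => q.2 == 1 && ((PySem.Dict.mk (sol[t]'ht)).get? q.1 == some 1))
           = (rest.any fun q => q.2 == 1 && ((PySem.Dict.mk (sol[t]'ht)).get? q.1 == some 1)) := by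
        simp [List.any_cons, hp]
      rw [this]

-- the two any-tests agree on a duplicate-free turn dict
theorem pv_any_transpose (utt : List (Int × Int)) (so : List (Int × Int))
    (hnd : (so.map Prod.fst).Nodup) :
    (utt.any fun p => p.2 == 1 && ((PySem.Dict.mk so).get? p.1 == some 1))
      = (so.any fun q => q.2 == 1 && ((utt.filter (fun p => p.2 == 1)).map (·.1)).contains q.1) := by
  have hkeys : ((PySem.Dict.mk so).keys).Nodup := by simpa [PySem.Dict.keys] using hnd
  rw [Bool.eq_iff_iff, List.any_eq_true, List.any_eq_true]
  constructor
  · rintro ⟨p, hp, hc⟩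
    rw [Bool.and_eq_true, beq_iff_eq, beq_iff_eq] at hc
    have hmem : (p.1, (1 : Int)) ∈ so := by
      have := PySem.Dict.mem_items_of_get?_eq_some (d := PySem.Dict.mk so) hc.2
      simpa [PySem.Dict.items] using this
    refine ⟨(p.1, 1), hmem, ?_⟩
    simp only [Bool.and_eq_true, beq_iff_eq, List.contains_eq_mem, decide_eq_true_eq]
    refine ⟨by trivial, ?_⟩
    exact List.mem_map_of_mem (List.mem_filter.mpr ⟨hp, by simp [hc.1]⟩)
  · rintro ⟨q, hq, hc⟩
    simp only [Bool.and_eq_true, beq_iff_eq, List.contains_eq_mem, decide_eq_true_eq,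
      List.mem_map, List.mem_filter] at hc
    obtain ⟨hq1, p, ⟨hpmem, hp1⟩, hpq⟩ := hc
    refine ⟨p, hpmem, ?_⟩
    simp only [Bool.and_eq_true, beq_iff_eq]
    refine ⟨by simpa using hp1, ?_⟩
    have : ((p.1 : Int), (1 : Int)) ∈ (PySem.Dict.mk so).items := by
      simpa [PySem.Dict.items, hpq] using (hq1 ▸ hq : (q.1, (1:Int)) ∈ so)
    exact PySem.Dict.get?_of_mem_items (d := PySem.Dict.mk so) this hkeys
 
-- ===== VERDICT (by name: the statement is the Claim_ definition above) =====
theorem utt2system_spec : Claim_equal_utt2system := by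
  intro utt_obj sys_obj_list _ hpre
  unfold Spec_utt2system utt2system utt2system_alt
  have hutt : utt_obj.foldl (fun acc p => if p.2 == 1 then acc ++ [p.1] else acc) ([] : List Int)
      = (utt_obj.filter (fun p => p.2 == 1)).map (·.1) := by
    simpa using PySem.List.foldl_append_if (fun p : Int × Int => p.2 == 1) (·.1)
      (l := utt_obj) (acc := [])
  set keys := (utt_obj.filter (fun p => p.2 == 1)).map (·.1) with hkeys
  rw [hutt]
  simp only [pv_outer_eq keys sys_obj_list [] [], List.nil_append]
  obtain ⟨hblen, hbflag, hbget⟩ := pv_b_outer sys_obj_list utt_obj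
    (List.replicate sys_obj_list.length 0) false (by simp)
  rw [Prod.mk.injEq]
  constructor
  · apply List.ext_getElem?
    intro t
    by_cases ht : t < sys_obj_list.length
    · rw [hbget t ht, List.getElem?_map, List.getElem?_eq_getElem ht]
      simp only [Option.map_some]
      rw [pv_label_eq keys (sys_obj_list[t]'ht),
          pv_any_transpose utt_obj (sys_obj_list[t]'ht) (hpre _ (List.getElem_mem ht)), ← hkeys]
      by_cases h : ((sys_obj_list[t]'ht).any fun q => q.2 == 1 && keys.contains q.1) = true
      · rw [if_pos h, if_pos h]
      · rw [if_neg h, if_neg h, List.getElem?_replicate, if_pos ht]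
    · rw [List.getElem?_eq_none (by simp; omega),
          List.getElem?_eq_none (by omega)]
  · rw [pv_objcat, hbflag]
    have : keys.isEmpty = !(utt_obj.any fun p => p.2 == 1) := by
      rw [hkeys]
      rcases h : utt_obj.any fun p => p.2 == 1 with _ | _
      · rw [List.any_eq_false] at h
        simp only [Bool.not_false, List.isEmpty_iff, List.map_eq_nil_iff, List.filter_eq_nil_iff]
        exact fun p hp => by simpa using h p hp
      · rw [List.any_eq_true] at h
        obtain ⟨p, hp, hp1⟩ := h
        simp only [Bool.not_true, List.isEmpty_eq_false_iff, ne_eq, List.map_eq_nil_iff,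
          List.filter_eq_nil_iff, not_forall]
        exact ⟨p, hp, by simpa using hp1⟩
    rw [this]
    rcases utt_obj.any fun p => p.2 == 1 with _ | _ <;> simp
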